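-- pv_equiv track=rewrite | github.com/ppshah23/Vibe-Coding-Projects | agents/agent.py | _parse_perf_script
-- ===== SOURCE A (Python) =====
-- def _parse_perf_script(text: str) -> list:
--     """Return list of stacks in root→leaf order from perf script output."""
--     stacks, current = [], []
--     for line in text.splitlines():
--         stripped = line.strip()
--         if not stripped:
--             if current:
--                 stacks.append(list(reversed(current)))
--                 current = []
--         elif line.startswith(("\t", " ")):
--             parts = stripped.split(None, 1)
--             current.append(parts[1] if len(parts) > 1 else parts[0])
--     if current:
--         stacks.append(list(reversed(current)))
--     return stacks
-- ===== SOURCE B (Python) =====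
-- def _parse_perf_script(text: str) -> list:
--     """Return list of stacks in root→leaf order from perf script output."""
--     lines = text.splitlines()
--     # Phase 1: partition into maximal blocks of non-blank lines.
--     blocks, i, n = [], 0, len(lines)
--     while i < n:
--         if not lines[i].strip():
--             i += 1
--             continue
--         j = i
--         while j < n and lines[j].strip():
--             j += 1
--         blocks.append(lines[i:j])
--         i = j
--     # Phase 2: map each block to its frames; keep non-empty ones reversed.
--     result = []
--     for block in blocks:
--         frames = []
--         for line in block:
--             if line.startswith(("\t", " ")):
--                 parts = line.strip().split(None, 1)
--                 frames.append(parts[1] if len(parts) > 1 else parts[0])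
--         if frames:
--             result.append(list(reversed(frames)))
--     return result
-- ===== Notes on version B (the rewrite author's own statement) =====
-- stated objective: alternative
-- what changed: Replaces A's single pass with a running accumulator flushed at blank lines and EOF by a two-phase decomposition: first partition the lines into maximal blocks of non-blank lines, then map each block independently to its (reversed) frame list, keeping non-empty ones.
import Mathlib
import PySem

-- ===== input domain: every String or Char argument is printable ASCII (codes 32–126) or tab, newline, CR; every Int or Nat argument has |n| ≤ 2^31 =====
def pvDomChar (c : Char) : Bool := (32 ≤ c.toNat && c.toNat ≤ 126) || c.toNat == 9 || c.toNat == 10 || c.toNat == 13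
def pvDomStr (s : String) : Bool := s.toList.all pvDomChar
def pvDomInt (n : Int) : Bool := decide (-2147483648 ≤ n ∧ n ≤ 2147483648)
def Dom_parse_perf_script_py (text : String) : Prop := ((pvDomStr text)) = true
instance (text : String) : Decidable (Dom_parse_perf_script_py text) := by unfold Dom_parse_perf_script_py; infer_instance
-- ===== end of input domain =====

-- B replaces A's running accumulator (flushed at blank lines and EOF) by a two-phase
-- decomposition — partition the lines into maximal non-blank blocks, then map each block
-- to its stack — returning the same value (objective: alternative decomposition).

-- ===== PORT A =====
-- one iteration of A's loop; state = (stacks, current)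
def pvStepA (st : List (List String) × List String) (line : String) :
    List (List String) × List String :=
  let stripped := PySem.Str.strip line
  if stripped = "" then
    if st.2 ≠ [] then (st.1 ++ [st.2.reverse], []) else st
  else if PySem.Str.startswith line "\t" || PySem.Str.startswith line " " then
    let parts := PySem.Str.split₀Max stripped 1
    (st.1, st.2 ++ [if parts.length > 1 then parts.getD 1 "" else parts.getD 0 ""])
  else st

def parse_perf_script_py (text : String) : List (List String) :=
  let st := (PySem.Str.splitlines text).foldl pvStepA ([], [])
  if st.2 ≠ [] then st.1 ++ [st.2.reverse] else st.1

-- ===== PORT B =====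
-- phase 1 of Source B: the maximal runs of non-blank lines (the two nested while loops)
def pvBlocks : List String → List (List String)
  | [] => []
  | l :: ls =>
    if PySem.Str.strip l = "" then pvBlocks ls
    else (l :: ls.takeWhile (fun x => PySem.Str.strip x ≠ ""))
           :: pvBlocks (ls.dropWhile (fun x => PySem.Str.strip x ≠ ""))
termination_by lines => lines.length
decreasing_by
  · simp
  · have := List.length_dropWhile_le (fun x => decide (PySem.Str.strip x ≠ "")) ls
    simp_all

-- phase 2 of Source B: the frame a single line of a block contributes, if any
def pvFrame (line : String) : Option String :=
  if PySem.Str.startswith line "\t" || PySem.Str.startswith line " " then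
    let parts := PySem.Str.split₀Max (PySem.Str.strip line) 1
    some (if parts.length > 1 then parts.getD 1 "" else parts.getD 0 "")
  else none

-- phase 2 of Source B: the stack of a block, if it has any frames
def pvBf (block : List String) : Option (List String) :=
  let frames := block.filterMap pvFrame
  if frames = [] then none else some frames.reverse

def parse_perf_script_py_alt (text : String) : List (List String) :=
  (pvBlocks (PySem.Str.splitlines text)).filterMap pvBf

-- ===== PRECONDITION & SPEC =====
def Spec_parse_perf_script_py (text : String) (out : List (List String)) : Prop := out = parse_perf_script_py_alt text
instance (text : String) (out : List (List String)) : Decidable (Spec_parse_perf_script_py text out) := by unfold Spec_parse_perf_script_py; infer_instance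

-- ===== CLAIM (what is proved, stated in full; the proofs are below) =====
def Claim_equal_parse_perf_script_py : Prop := ∀ (text : String), Dom_parse_perf_script_py text → Spec_parse_perf_script_py text (parse_perf_script_py text)

-- ===== LEMMAS AND PROOFS =====

-- the stacks still to be produced from the remaining lines, given the pending frames `cur`
def pvG (cur : List String) : List String → List (List String)
  | [] => if cur = [] then [] else [cur.reverse]
  | l :: ls =>
    if PySem.Str.strip l = "" then
      (if cur = [] then [] else [cur.reverse]) ++ pvG [] ls
    else pvG (cur ++ (pvFrame l).toList) ls

-- A's fold-and-flush computes acc ++ pvG cur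
theorem pvG_spec_A (lines : List String) : ∀ (acc : List (List String)) (cur : List String),
    (let st := lines.foldl pvStepA (acc, cur)
     if st.2 ≠ [] then st.1 ++ [st.2.reverse] else st.1) = acc ++ pvG cur lines := by
  induction lines with
  | nil =>
    intro acc cur
    simp only [List.foldl_nil, pvG]
    by_cases h : cur = [] <;> simp [h]
  | cons l ls ih =>
    intro acc cur
    simp only [List.foldl_cons, pvG, pvStepA, pvFrame]
    by_cases hb : PySem.Str.strip l = ""
    · simp only [hb]
      by_cases hc : cur = []
      · simp [hc, ih]
      · simp [hc, ih, List.append_assoc]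
    · simp only [if_neg hb]
      by_cases hs : (PySem.Str.startswith l "\t" || PySem.Str.startswith l " ") = true
      · rw [if_pos hs, if_pos hs]
        simp [ih]
      · rw [if_neg hs, if_neg hs]
        simp [ih]

-- the head of a dropWhile result fails the predicate
theorem pv_dropWhile_head (p : String → Bool) (xs : List String) :
    ∀ r rs, xs.dropWhile p = r :: rs → p r = false := by
  induction xs with
  | nil => intro r rs h; simp [List.dropWhile] at h
  | cons x xs ih =>
    intro r rs h
    by_cases hx : p x = true
    · rw [List.dropWhile_cons_of_pos hx] at h; exact ih r rs h
    · rw [List.dropWhile_cons_of_neg hx] at h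
      cases h; simpa using hx

-- pvG absorbs a non-blank prefix into the pending frames
theorem pvG_nonblank_prefix (t : List String) : ∀ (cur rest : List String),
    (∀ x ∈ t, PySem.Str.strip x ≠ "") →
    pvG cur (t ++ rest) = pvG (cur ++ t.filterMap pvFrame) rest := by
  induction t with
  | nil => intro cur rest _; simp
  | cons x t ih =>
    intro cur rest h
    have hx : PySem.Str.strip x ≠ "" := h x (by simp)
    simp only [List.cons_append, pvG, if_neg hx, List.filterMap_cons]
    cases hf : pvFrame x with
    | none => simpa using ih _ rest (fun y hy => h y (by simp [hy]))
    | some a =>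
      have := ih (cur ++ [a]) rest (fun y hy => h y (by simp [hy]))
      simpa [List.append_assoc] using this

-- emitting a block's frames is pvBf as a list
theorem pvBf_emit (b : List String) :
    (if b.filterMap pvFrame = [] then ([] : List (List String)) else [(b.filterMap pvFrame).reverse]) =
    (pvBf b).toList := by
  unfold pvBf
  by_cases h : b.filterMap pvFrame = [] <;> simp [h]

theorem filterMap_pvBf_cons (b : List String) (bs : List (List String)) :
    List.filterMap pvBf (b :: bs) = (pvBf b).toList ++ List.filterMap pvBf bs := by
  rw [List.filterMap_cons]
  cases pvBf b <;> simp

-- pvG with no pending frames is B's block-wise computation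
theorem pvG_eq_blocks (lines : List String) :
    pvG [] lines = (pvBlocks lines).filterMap pvBf := by
  induction hn : lines.length using Nat.strong_induction_on generalizing lines with
  | _ n ih =>
  cases lines with
  | nil => simp [pvG, pvBlocks]
  | cons l ls =>
    simp only [List.length_cons] at hn
    by_cases hb : PySem.Str.strip l = ""
    · rw [pvBlocks]
      simp only [pvG, hb, List.nil_append]
      exact ih ls.length (by omega) ls rfl
    · rw [pvBlocks]
      simp only [if_neg hb]
      have hsplit : ls = ls.takeWhile (fun x => PySem.Str.strip x ≠ "") ++
          ls.dropWhile (fun x => PySem.Str.strip x ≠ "") := (List.takeWhile_append_dropWhile).symm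
      set t := ls.takeWhile (fun x => PySem.Str.strip x ≠ "") with ht
      set d := ls.dropWhile (fun x => PySem.Str.strip x ≠ "") with hd
      have hmem : ∀ x ∈ t, PySem.Str.strip x ≠ "" := by
        intro x hx
        have := List.mem_takeWhile_imp hx
        simpa using this
      have h1 : pvG [] (l :: ls) = pvG ((l :: t).filterMap pvFrame) d := by
        rw [pvG, if_neg hb, List.nil_append]
        conv_lhs => rw [hsplit]
        rw [pvG_nonblank_prefix t _ d hmem, List.filterMap_cons]
        cases hf : pvFrame l <;> simp
      have hdlen : d.length ≤ ls.length := List.length_dropWhile_le _ _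
      rw [h1]
      cases hdc : d with
      | nil =>
        have hb0 : pvBlocks ([] : List String) = [] := by rw [pvBlocks]
        rw [pvG, hb0, filterMap_pvBf_cons, List.filterMap_nil, List.append_nil, ← pvBf_emit]
      | cons r rs =>
        have hr : PySem.Str.strip r = "" := by
          have := pv_dropWhile_head (fun x => decide (PySem.Str.strip x ≠ "")) ls r rs (hd ▸ hdc)
          simpa using this
        have hrec : pvG [] rs = (pvBlocks rs).filterMap pvBf := by
          have : (r :: rs).length ≤ ls.length := hdc ▸ hdlen
          simp only [List.length_cons] at this
          exact ih rs.length (by omega) rs rfl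
        have hbd : pvBlocks (r :: rs) = pvBlocks rs := by rw [pvBlocks, if_pos hr]
        rw [pvG, if_pos hr, hbd, hrec, filterMap_pvBf_cons, ← pvBf_emit]

-- ===== VERDICT (by name: the statement is the Claim_ definition above) =====
theorem parse_perf_script_py_spec : Claim_equal_parse_perf_script_py := by
  intro text _
  unfold Spec_parse_perf_script_py parse_perf_script_py parse_perf_script_py_alt
  rw [pvG_spec_A (PySem.Str.splitlines text) [] []]
  simp [pvG_eq_blocks]
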